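-- pv_equiv track=rewrite | github.com/iKonon/checkio | treeWords.py | treeWords
-- ===== SOURCE A (Python) =====
-- def treeWords(words):
--     count = 0
--     words = words.split()
--     for word in words:
--         if word.isalpha():
--             count += 1
--         else:
--             count = 0
--     if count > 2: return True
--     else:  return False
-- ===== SOURCE B (Python) =====
-- def treeWords(words):
--     count = 0
--     for word in reversed(words.split()):
--         if word.isalpha():
--             count += 1
--         else:
--             break
--     return count > 2
-- ===== Notes on version B (the rewrite author's own statement) =====
-- stated objective: idiomatic
-- what changed: B scans the word list in reverse, counting consecutive alpha words and breaking at the first non-alpha word, instead of A's full forward pass with a reset counter.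
import Mathlib
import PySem

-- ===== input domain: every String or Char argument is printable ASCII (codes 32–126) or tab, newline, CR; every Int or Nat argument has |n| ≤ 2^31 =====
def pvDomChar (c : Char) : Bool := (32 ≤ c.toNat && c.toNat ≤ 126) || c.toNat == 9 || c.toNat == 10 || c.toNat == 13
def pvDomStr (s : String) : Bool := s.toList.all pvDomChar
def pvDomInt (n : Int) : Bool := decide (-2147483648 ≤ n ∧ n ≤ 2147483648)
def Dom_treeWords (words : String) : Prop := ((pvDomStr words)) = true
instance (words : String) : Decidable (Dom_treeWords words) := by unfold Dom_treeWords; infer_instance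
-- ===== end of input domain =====

-- B replaces A's full forward pass with a reset counter by a reverse scan that counts trailing alpha words and stops at the first non-alpha word (idiomatic early termination; same cost).


-- ===== PORT A =====
def treeWords (words : String) : Bool :=
  let ws := PySem.Str.split₀ words
  let count := ws.foldl (fun c w => if PySem.Str.strIsalpha w then c + 1 else 0) 0
  if count > 2 then true else false

-- ===== PORT B =====
-- trailing run of alpha words, scanning the reversed list and stopping at the first non-alpha word (the 'break')
def tailAlphaCount : List String → Nat
  | [] => 0
  | w :: rest => if PySem.Str.strIsalpha w then 1 + tailAlphaCount rest else 0

def treeWords_alt (words : String) : Bool :=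
  decide (tailAlphaCount (PySem.Str.split₀ words).reverse > 2)

-- ===== PRECONDITION & SPEC =====
def Spec_treeWords (words : String) (out : Bool) : Prop := out = treeWords_alt words
instance (words : String) (out : Bool) : Decidable (Spec_treeWords words out) := by unfold Spec_treeWords; infer_instance

-- ===== CLAIM (what is proved, stated in full; the proofs are below) =====
def Claim_equal_treeWords : Prop := ∀ (words : String), Dom_treeWords words → Spec_treeWords words (treeWords words)

-- ===== LEMMAS AND PROOFS =====
theorem count_eq_tail (ws : List String) :
    ws.foldl (fun c w => if PySem.Str.strIsalpha w then c + 1 else 0) 0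
      = tailAlphaCount ws.reverse := by
  induction ws using List.reverseRecOn with
  | nil => rfl
  | append_singleton xs x ih =>
      rw [List.foldl_append, List.reverse_append]
      simp only [List.reverse_singleton, List.singleton_append, List.foldl_cons,
        List.foldl_nil, tailAlphaCount, ih]
      split_ifs <;> omega


-- ===== VERDICT (by name: the statement is the Claim_ definition above) =====
theorem treeWords_spec : Claim_equal_treeWords := by
  intro words _
  unfold Spec_treeWords treeWords treeWords_alt
  simp only [count_eq_tail]
  split_ifs with h <;> simp
  · omega
  · omega
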